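-- pv_equiv track=rewrite | github.com/Fopentos/FakeSherlock | main.py | format_sherlock_report
-- ===== SOURCE A (Python) =====
-- from typing import Dict, Any, List, Optional, Tuple
--
-- def format_sherlock_report(results: Dict[str, str]) -> str:
--     """Форматирует результаты Sherlock в читаемый текст."""
--     if not results:
--         return ""
--
--     lines = ["**🌐 Найденные профили (Sherlock):**"]
--     # Группируем по категориям
--     categories = {
--         "📱 Соцсети": ["instagram", "twitter", "facebook", "vk", "tiktok", "snapchat", "youtube", "reddit", "pinterest", "tumblr"],
--         "💻 Разработка": ["github", "gitlab", "bitbucket", "stackoverflow", "codepen"],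
--         "🎮 Игры": ["steam", "xbox", "playstation", "twitch", "discord"],
--         "💰 Финансы": ["paypal", "cashapp", "venmo"],
--         "🔞 Adult": ["onlyfans", "fansly", "adultfriendfinder"],
--     }
--
--     categorized = {cat: [] for cat in categories}
--     other_sites = []
--
--     for site, url in results.items():
--         placed = False
--         for cat, keywords in categories.items():
--             if any(kw in site.lower() for kw in keywords):
--                 categorized[cat].append(f"[{site}]({url})")
--                 placed = True
--                 break
--         if not placed:
--             other_sites.append(f"[{site}]({url})")
--
--     for cat, items in categorized.items():
--         if items:
--             lines.append(f"\n{cat}:")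
--             lines.extend([f"  • {item}" for item in items])
--
--     if other_sites:
--         lines.append(f"\n**📎 Прочее:**")
--         lines.extend([f"  • {item}" for item in other_sites])
--
--     return "\n".join(lines)
-- ===== SOURCE B (Python) =====
-- def format_sherlock_report(results):
--     """Category-major rewrite: iterate the fixed categories as the outer loop,
--     claiming each site at most once via a `placed` set; same output as A."""
--     if not results:
--         return ""
--
--     categories = [
--         ("📱 Соцсети", ["instagram", "twitter", "facebook", "vk", "tiktok", "snapchat", "youtube", "reddit", "pinterest", "tumblr"]),
--         ("💻 Разработка", ["github", "gitlab", "bitbucket", "stackoverflow", "codepen"]),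
--         ("🎮 Игры", ["steam", "xbox", "playstation", "twitch", "discord"]),
--         ("💰 Финансы", ["paypal", "cashapp", "venmo"]),
--         ("🔞 Adult", ["onlyfans", "fansly", "adultfriendfinder"]),
--     ]
--
--     placed = set()
--     lines = ["**🌐 Найденные профили (Sherlock):**"]
--     for cat, keywords in categories:
--         items = []
--         for site, url in results.items():
--             if site not in placed and any(kw in site.lower() for kw in keywords):
--                 placed.add(site)
--                 items.append(f"[{site}]({url})")
--         if items:
--             lines.append(f"\n{cat}:")
--             lines.extend(f"  • {item}" for item in items)
--
--     other = [f"[{site}]({url})" for site, url in results.items() if site not in placed]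
--     if other:
--         lines.append("\n**📎 Прочее:**")
--         lines.extend(f"  • {item}" for item in other)
--
--     return "\n".join(lines)
-- ===== Notes on version B (the rewrite author's own statement) =====
-- stated objective: alternative
-- what changed: Inverted the loop nesting: instead of one pass over results with an inner first-match scan over categories, B iterates the fixed categories as the outer loop, scanning all results per category and claiming each site at most once via a `placed` set, then collects the unclaimed sites as 'other'.
import Mathlib
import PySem

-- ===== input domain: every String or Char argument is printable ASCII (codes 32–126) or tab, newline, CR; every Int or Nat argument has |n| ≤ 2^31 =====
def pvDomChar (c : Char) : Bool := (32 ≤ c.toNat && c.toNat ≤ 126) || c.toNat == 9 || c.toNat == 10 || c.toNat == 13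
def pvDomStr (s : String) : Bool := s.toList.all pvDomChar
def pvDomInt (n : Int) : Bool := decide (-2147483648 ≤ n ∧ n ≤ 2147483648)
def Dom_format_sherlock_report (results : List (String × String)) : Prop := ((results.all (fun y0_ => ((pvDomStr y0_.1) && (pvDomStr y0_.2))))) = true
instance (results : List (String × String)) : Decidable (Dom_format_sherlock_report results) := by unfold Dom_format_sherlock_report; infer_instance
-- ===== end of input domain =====

-- B re-implements A with inverted loop nesting (categories outer, results inner, a `placed` set); alternative decomposition, same output.


-- ===== PORT A =====
-- the `categories` dict of A (and of B), as an association list in insertion order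
def pvCats : List (String × List String) :=
  [("📱 Соцсети", ["instagram", "twitter", "facebook", "vk", "tiktok", "snapchat", "youtube", "reddit", "pinterest", "tumblr"]),
   ("💻 Разработка", ["github", "gitlab", "bitbucket", "stackoverflow", "codepen"]),
   ("🎮 Игры", ["steam", "xbox", "playstation", "twitch", "discord"]),
   ("💰 Финансы", ["paypal", "cashapp", "venmo"]),
   ("🔞 Adult", ["onlyfans", "fansly", "adultfriendfinder"])]

-- any(kw in site.lower() for kw in keywords)
def pvMatch (kws : List String) (site : String) : Bool :=
  kws.any (fun kw => PySem.Str.isIn kw (PySem.Str.lower site))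

-- f"[{site}]({url})"
def pvFmt (site url : String) : String := "[" ++ site ++ "](" ++ url ++ ")"

-- lines.append(f"\n{cat}:"); lines.extend([f"  • {item}" for item in items])  (shared by both pythons verbatim)
def pvSection (cat : String) (items : List String) : List String :=
  ("\n" ++ cat ++ ":") :: items.map (fun it => "  • " ++ it)

-- categorized[cat].append(v): update the value at key `cat`; exact, since categorized's keys are the 5 distinct category names
def pvUpd (cz : List (String × List String)) (c : String) (v : String) : List (String × List String) :=
  cz.map (fun kl => if kl.1 = c then (kl.1, kl.2 ++ [v]) else kl)

-- A's per-site loop body: first matching category wins (the inner `for cat ... break` is a find over pvCats)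
def pvStepA (st : List (String × List String) × List String) (r : String × String) :
    List (String × List String) × List String :=
  match pvCats.find? (fun p => pvMatch p.2 r.1) with
  | some p => (pvUpd st.1 p.1 (pvFmt r.1 r.2), st.2)
  | none   => (st.1, st.2 ++ [pvFmt r.1 r.2])

-- `for cat, items in categorized.items(): if items: ...`
def pvSecStep (acc : List String) (ci : String × List String) : List String :=
  if ci.2 = [] then acc else acc ++ pvSection ci.1 ci.2

def format_sherlock_report (results : List (String × String)) : String :=
  if results = [] then ""
  else
    let st := results.foldl pvStepA (pvCats.map (fun p => (p.1, ([] : List String))), [])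
    let lines := st.1.foldl pvSecStep ["**🌐 Найденные профили (Sherlock):**"]
    let lines := if st.2 = [] then lines else lines ++ "\n**📎 Прочее:**" :: st.2.map (fun it => "  • " ++ it)
    PySem.Str.join "\n" lines

-- ===== PORT B =====
-- B's inner loop: claim an unplaced matching site into this category's items
def pvInnerB (kws : List String) (q : PySem.Set String × List String) (r : String × String) :
    PySem.Set String × List String :=
  if !PySem.Set.contains q.1 r.1 && pvMatch kws r.1
  then (PySem.Set.add q.1 r.1, q.2 ++ [pvFmt r.1 r.2])
  else q

-- B's outer loop body: one category's pass over all results, then emit its section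
def pvStepB (results : List (String × String)) (st : PySem.Set String × List String)
    (p : String × List String) : PySem.Set String × List String :=
  let inner := results.foldl (pvInnerB p.2) (st.1, [])
  if inner.2 = [] then (inner.1, st.2) else (inner.1, st.2 ++ pvSection p.1 inner.2)

def format_sherlock_report_alt (results : List (String × String)) : String :=
  if results = [] then ""
  else
    let st := pvCats.foldl (pvStepB results) (PySem.Set.empty, ["**🌐 Найденные профили (Sherlock):**"])
    let other := (results.filter (fun r => !PySem.Set.contains st.1 r.1)).map (fun r => pvFmt r.1 r.2)
    let lines := if other = [] then st.2 else st.2 ++ "\n**📎 Прочее:**" :: other.map (fun it => "  • " ++ it)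
    PySem.Str.join "\n" lines

-- ===== PRECONDITION & SPEC =====
-- `results` is a Python dict, whose keys are necessarily distinct; Pre_ excludes only association
-- lists with duplicate keys, which represent no dict input A could ever receive.
def Pre_format_sherlock_report (results : List (String × String)) : Prop :=
  (results.map Prod.fst).Nodup
instance (results : List (String × String)) : Decidable (Pre_format_sherlock_report results) := by
  unfold Pre_format_sherlock_report; infer_instance

def pvWitness_format_sherlock_report : (List (String × String)) :=
  [("GitHub", "http://github.com/x"), ("mysite", "http://mysite")]

def Spec_format_sherlock_report (results : List (String × String)) (out : String) : Prop :=
  out = format_sherlock_report_alt results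
instance (results : List (String × String)) (out : String) : Decidable (Spec_format_sherlock_report results out) := by
  unfold Spec_format_sherlock_report; infer_instance

-- ===== CLAIM (what is proved, stated in full; the proofs are below) =====
def Claim_equal_format_sherlock_report : Prop := ∀ (results : List (String × String)), Dom_format_sherlock_report results → Pre_format_sherlock_report results → Spec_format_sherlock_report results (format_sherlock_report results)

-- ===== LEMMAS AND PROOFS =====

-- proof-side: the category A assigns a site to (first match), relative to any suffix of categories
def pvBKey (cats : List (String × List String)) (s : String) : Option String :=
  (cats.find? (fun p => pvMatch p.2 s)).map Prod.fst

def pvAKey (s : String) : Option String := pvBKey pvCats s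

def pvItems (c : String) (rs : List (String × String)) : List String :=
  (rs.filter (fun r => decide (pvAKey r.1 = some c))).map (fun r => pvFmt r.1 r.2)

def pvQ (cats : List (String × List String)) (s : String) : Bool :=
  cats.any (fun p => pvMatch p.2 s)

theorem pv_foldA (rs : List (String × String)) :
    ∀ (cz : List (String × List String)) (oth : List String),
    rs.foldl pvStepA (cz, oth)
      = (cz.map (fun kl => (kl.1, kl.2 ++ pvItems kl.1 rs)),
         oth ++ (rs.filter (fun r => decide (pvAKey r.1 = none))).map (fun r => pvFmt r.1 r.2)) := by
  induction rs with
  | nil => intro cz oth; simp [pvItems]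
  | cons r rs ih =>
    intro cz oth
    rw [List.foldl_cons]
    cases h : pvCats.find? (fun p => pvMatch p.2 r.1) with
    | some p =>
      have hk : pvAKey r.1 = some p.1 := by simp [pvAKey, pvBKey, h]
      have hstep : pvStepA (cz, oth) r = (pvUpd cz p.1 (pvFmt r.1 r.2), oth) := by
        simp [pvStepA, h]
      rw [hstep, ih]
      refine Prod.ext ?_ ?_
      · simp only [pvUpd, List.map_map, pvItems, List.filter_cons, hk]
        apply List.map_congr_left
        intro kl _
        by_cases hc : kl.1 = p.1
        · simp [Function.comp, hc, pvItems, List.filter_cons, hk]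
        · have hns : ¬ p.1 = kl.1 := fun hh => hc hh.symm
          simp [Function.comp, hc, pvItems, List.filter_cons, hk, hns]
      · simp [pvItems, List.filter_cons, hk]
    | none =>
      have hk : pvAKey r.1 = none := by simp [pvAKey, pvBKey, h]
      have hstep : pvStepA (cz, oth) r = (cz, oth ++ [pvFmt r.1 r.2]) := by
        simp [pvStepA, h]
      rw [hstep, ih]
      refine Prod.ext ?_ ?_
      · simp only [pvItems, List.filter_cons, hk]
        simp
      · simp [List.filter_cons, hk]

theorem pvContains_add_ne (P : PySem.Set String) (x y : String) (h : y ≠ x) :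
    PySem.Set.contains (PySem.Set.add P x) y = PySem.Set.contains P y := by
  simp [PySem.Set.contains_eq_listContains, List.contains_eq_mem, PySem.Set.mem_add, h]


theorem pvBKey_mem (cats : List (String × List String)) (s : String) (c : String)
    (h : pvBKey cats s = some c) : c ∈ cats.map Prod.fst := by
  unfold pvBKey at h
  obtain ⟨p, hp, hpc⟩ := Option.map_eq_some_iff.mp h
  exact hpc ▸ List.mem_map_of_mem (List.mem_of_find?_eq_some hp)


theorem pv_innerB (kws : List String) :
    ∀ (rs : List (String × String)) (P : PySem.Set String) (acc : List String),
    (rs.map Prod.fst).Nodup →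
    (rs.foldl (pvInnerB kws) (P, acc)).2
        = acc ++ (rs.filter (fun r => !PySem.Set.contains P r.1 && pvMatch kws r.1)).map (fun r => pvFmt r.1 r.2)
    ∧ ∀ s : String, PySem.Set.contains (rs.foldl (pvInnerB kws) (P, acc)).1 s
        = (PySem.Set.contains P s || rs.any (fun r => decide (r.1 = s) && (!PySem.Set.contains P r.1 && pvMatch kws r.1))) := by
  intro rs
  induction rs with
  | nil => intro P acc _; exact ⟨by simp, by intro s; simp⟩
  | cons r rs ih =>
    intro P acc hnd
    rw [List.map_cons, List.nodup_cons] at hnd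
    obtain ⟨hr, hnd'⟩ := hnd
    rw [List.foldl_cons]
    by_cases hc : (!PySem.Set.contains P r.1 && pvMatch kws r.1) = true
    · have hm : PySem.Set.contains P r.1 = false := by
        rcases Bool.and_eq_true .. |>.mp hc with ⟨h1, _⟩
        exact Bool.not_eq_true' .. |>.mp h1
      have hq : pvMatch kws r.1 = true := (Bool.and_eq_true .. |>.mp hc).2
      have hnm : r.1 ∉ P := by
        simpa [PySem.Set.contains_eq_listContains, List.contains_eq_mem] using hm
      have hstep : pvInnerB kws (P, acc) r = (PySem.Set.add P r.1, acc ++ [pvFmt r.1 r.2]) := by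
        simp only [pvInnerB, hc]
        simp
      rw [hstep]
      obtain ⟨h2, h1⟩ := ih (PySem.Set.add P r.1) (acc ++ [pvFmt r.1 r.2]) hnd'
      have hcong : ∀ r' ∈ rs,
          (!PySem.Set.contains (PySem.Set.add P r.1) r'.1 && pvMatch kws r'.1)
            = (!PySem.Set.contains P r'.1 && pvMatch kws r'.1) := by
        intro r' hr'
        have hne : r'.1 ≠ r.1 := by
          intro hh; exact hr (hh ▸ List.mem_map_of_mem hr')
        rw [pvContains_add_ne _ _ _ hne]
      constructor
      · rw [h2, List.filter_congr hcong, List.filter_cons, hc]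
        simp
      · intro s
        rw [h1 s, List.any_cons]
        have hany : (rs.any (fun r' => decide (r'.1 = s) && (!PySem.Set.contains (PySem.Set.add P r.1) r'.1 && pvMatch kws r'.1)))
            = (rs.any (fun r' => decide (r'.1 = s) && (!PySem.Set.contains P r'.1 && pvMatch kws r'.1))) := by
          rw [Bool.eq_iff_iff]
          simp only [List.any_eq_true]
          constructor
          · rintro ⟨r', hr', hh⟩; exact ⟨r', hr', by rwa [hcong r' hr'] at hh⟩
          · rintro ⟨r', hr', hh⟩; exact ⟨r', hr', by rwa [hcong r' hr']⟩
        rw [hany]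
        by_cases hs : s = r.1
        · subst hs
          simp [PySem.Set.contains_eq_listContains, List.contains_eq_mem, PySem.Set.mem_add, hnm, hq]
        · rw [pvContains_add_ne _ _ _ hs]
          have hds : decide (r.1 = s) = false := by
            simp only [decide_eq_false_iff_not]
            exact fun hh => hs hh.symm
          simp [hds]
    · have hcf : (!PySem.Set.contains P r.1 && pvMatch kws r.1) = false := by
        simpa using hc
      have hstep : pvInnerB kws (P, acc) r = (P, acc) := by
        simp only [pvInnerB, hcf]
        simp
      rw [hstep]
      obtain ⟨h2, h1⟩ := ih P acc hnd'
      constructor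
      · rw [h2, List.filter_cons, hcf]
        simp
      · intro s
        rw [h1 s, List.any_cons, hcf]
        simp

theorem pv_outerB (results : List (String × String)) (hnd : (results.map Prod.fst).Nodup) :
    ∀ (cats : List (String × List String)), (cats.map Prod.fst).Nodup →
    ∀ (P : PySem.Set String) (lines : List String),
    (∀ s ∈ results.map Prod.fst,
        (PySem.Set.contains P s = false ∧ pvAKey s = pvBKey cats s) ∨
        (PySem.Set.contains P s = true ∧ ∃ c, pvAKey s = some c ∧ c ∉ cats.map Prod.fst)) →
    (cats.foldl (pvStepB results) (P, lines)).2
        = cats.foldl (fun acc p => pvSecStep acc (p.1, pvItems p.1 results)) lines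
    ∧ ∀ s ∈ results.map Prod.fst,
        PySem.Set.contains (cats.foldl (pvStepB results) (P, lines)).1 s
          = (PySem.Set.contains P s || pvQ cats s) := by
  intro cats
  induction cats with
  | nil => intro _ P lines hP; exact ⟨rfl, by intro s _; simp [pvQ]⟩
  | cons p cs ih =>
    intro hcnd P lines hP
    rw [List.map_cons, List.nodup_cons] at hcnd
    obtain ⟨hpnot, hcnd'⟩ := hcnd
    -- the inner pass of category p
    obtain ⟨hI2, hI1⟩ := pv_innerB p.2 results P [] hnd
    -- pointwise: the claim test equals "A assigns this site to p"
    have hpt : ∀ r ∈ results,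
        (!PySem.Set.contains P r.1 && pvMatch p.2 r.1) = decide (pvAKey r.1 = some p.1) := by
      intro r hr
      rcases hP r.1 (List.mem_map_of_mem hr) with ⟨hf, hkey⟩ | ⟨ht, c, hc, hcnot⟩
      · rw [hf]
        by_cases hm : pvMatch p.2 r.1 = true
        · have hb : pvBKey (p :: cs) r.1 = some p.1 := by
            simp [pvBKey, List.find?_cons, hm]
          rw [hkey, hb]
          simp [hm]
        · have hm' : pvMatch p.2 r.1 = false := by simpa using hm
          have hb : pvBKey (p :: cs) r.1 = pvBKey cs r.1 := by
            simp [pvBKey, List.find?_cons, hm']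
          have hne : pvBKey cs r.1 ≠ some p.1 := by
            intro hh
            exact hpnot (pvBKey_mem cs r.1 p.1 hh)
          rw [hkey, hb]
          simp [hm', hne]
      · rw [ht]
        have hne : pvAKey r.1 ≠ some p.1 := by
          rw [hc]
          intro hh
          have hcp : c = p.1 := Option.some.inj hh
          exact hcnot (by simp [hcp])
        simp [hne]
    -- items of this pass = A's items for p
    have hitems : (results.foldl (pvInnerB p.2) (P, [])).2 = pvItems p.1 results := by
      rw [hI2, List.filter_congr hpt]
      simp [pvItems]
    -- membership after this pass
    have hmem : ∀ s ∈ results.map Prod.fst,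
        PySem.Set.contains (results.foldl (pvInnerB p.2) (P, [])).1 s
          = (PySem.Set.contains P s || pvMatch p.2 s) := by
      intro s hs
      obtain ⟨r0, hr0, hr0s⟩ := List.mem_map.mp hs
      rw [hI1 s]
      have hany : (results.any (fun r => decide (r.1 = s) && (!PySem.Set.contains P r.1 && pvMatch p.2 r.1)))
          = (!PySem.Set.contains P s && pvMatch p.2 s) := by
        rw [Bool.eq_iff_iff, List.any_eq_true]
        constructor
        · rintro ⟨r', hr', hh⟩
          rw [Bool.and_eq_true] at hh
          obtain ⟨he, hh⟩ := hh
          rw [decide_eq_true_eq] at he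
          rw [← he]
          exact hh
        · intro hh
          refine ⟨r0, hr0, ?_⟩
          rw [hr0s, Bool.and_eq_true]
          exact ⟨by simp, hh⟩
      rw [hany]
      cases hPs : PySem.Set.contains P s <;> simp
    rw [List.foldl_cons]
    have hstep : pvStepB results (P, lines) p
        = ((results.foldl (pvInnerB p.2) (P, [])).1, pvSecStep lines (p.1, pvItems p.1 results)) := by
      simp only [pvStepB, pvSecStep, hitems]
      by_cases hif : pvItems p.1 results = [] <;> simp [hif]
    rw [hstep]
    have hinv : ∀ s ∈ results.map Prod.fst,
        (PySem.Set.contains (results.foldl (pvInnerB p.2) (P, [])).1 s = false ∧ pvAKey s = pvBKey cs s) ∨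
        (PySem.Set.contains (results.foldl (pvInnerB p.2) (P, [])).1 s = true ∧
          ∃ c, pvAKey s = some c ∧ c ∉ cs.map Prod.fst) := by
      intro s hs
      rw [hmem s hs]
      rcases hP s hs with ⟨hf, hkey⟩ | ⟨ht, c, hc, hcnot⟩
      · by_cases hm : pvMatch p.2 s = true
        · right
          refine ⟨by simp only [hf, hm, Bool.false_or], p.1, ?_, hpnot⟩
          rw [hkey]
          simp [pvBKey, List.find?_cons, hm]
        · have hm' : pvMatch p.2 s = false := by simpa using hm
          left
          refine ⟨by simp only [hf, hm', Bool.false_or], ?_⟩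
          rw [hkey]
          simp [pvBKey, List.find?_cons, hm']
      · right
        refine ⟨by simp only [ht, Bool.true_or], c, hc, ?_⟩
        intro hh
        exact hcnot (by rw [List.map_cons]; exact List.mem_cons_of_mem _ hh)
    obtain ⟨hc2, hc1⟩ := ih hcnd' (results.foldl (pvInnerB p.2) (P, [])).1 (pvSecStep lines (p.1, pvItems p.1 results)) hinv
    constructor
    · rw [hc2, List.foldl_cons]
    · intro s hs
      rw [hc1 s hs, hmem s hs]
      simp [pvQ, Bool.or_assoc]


theorem pvAKey_none (s : String) : decide (pvAKey s = none) = !pvQ pvCats s := by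
  by_cases h : pvQ pvCats s = true
  · obtain ⟨p, hp, hm⟩ := List.any_eq_true.mp h
    have hne : pvCats.find? (fun q => pvMatch q.2 s) ≠ none := by
      rw [Ne, List.find?_eq_none]
      intro hall
      exact absurd hm (by simpa using hall p hp)
    simp [pvAKey, pvBKey, h, hne]
  · have h' : pvQ pvCats s = false := by simpa using h
    have hfn : pvCats.find? (fun q => pvMatch q.2 s) = none := by
      rw [List.find?_eq_none]
      intro p hp hm
      simp only [pvQ, List.any_eq_true] at h
      exact h ⟨p, hp, hm⟩
    simp [pvAKey, pvBKey, hfn, h']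

-- ===== VERDICT (by name: the statement is the Claim_ definition above) =====
theorem format_sherlock_report_spec : Claim_equal_format_sherlock_report := by
  unfold Claim_equal_format_sherlock_report
  intro results _ hpre
  unfold Spec_format_sherlock_report Pre_format_sherlock_report at *
  by_cases hres : results = []
  · simp [format_sherlock_report, format_sherlock_report_alt, hres]
  · simp only [format_sherlock_report, format_sherlock_report_alt, if_neg hres]
    -- A's single pass, characterised
    rw [pv_foldA results _ _]
    -- B's category-major fold, characterised
    obtain ⟨hB2, hB1⟩ := pv_outerB results hpre pvCats (by decide) PySem.Set.empty
      ["**🌐 Найденные профили (Sherlock):**"]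
      (by
        intro s _
        left
        refine ⟨?_, rfl⟩
        simp [PySem.Set.contains_eq_listContains, PySem.Set.empty])
    rw [hB2]
    have hother : (results.filter
          (fun r => !PySem.Set.contains (pvCats.foldl (pvStepB results) (PySem.Set.empty, ["**🌐 Найденные профили (Sherlock):**"])).1 r.1))
        = results.filter (fun r => decide (pvAKey r.1 = none)) := by
      apply List.filter_congr
      intro r hr
      rw [hB1 r.1 (List.mem_map_of_mem hr)]
      have he : PySem.Set.contains PySem.Set.empty r.1 = false := by
        simp [PySem.Set.contains_eq_listContains, PySem.Set.empty]
      rw [he, Bool.false_or, ← pvAKey_none r.1]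
    rw [hother]
    simp only [List.map_map, List.foldl_map, List.nil_append]
    rfl
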